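-- pv_equiv track=rewrite | github.com/nishantchauhan00/GeeksForGeeks | Companies Question/38 Find the number of islands.py | findIslands
-- ===== SOURCE A (Python) =====
-- def findIslands(arr, n, m):
--     out = 0
--
--     def spreadCoronavirus(n, m, i, j):
--         if i < 0 or i > n - 1 or j < 0 or j > m - 1 or arr[i][j] == 0:
--             return
--         arr[i][j] = 0
--         # now we will spread it in all 8 directions
--         # clockwise start from northwest
--         spreadCoronavirus(n, m, i - 1, j - 1)
--         spreadCoronavirus(n, m, i - 1, j)
--         spreadCoronavirus(n, m, i - 1, j + 1)
--         spreadCoronavirus(n, m, i, j + 1)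
--         spreadCoronavirus(n, m, i + 1, j + 1)
--         spreadCoronavirus(n, m, i + 1, j)
--         spreadCoronavirus(n, m, i + 1, j - 1)
--         spreadCoronavirus(n, m, i, j - 1)
--
--     for i in range(n):
--         for j in range(m):
--             if arr[i][j] == 1:
--                 out += 1
--                 spreadCoronavirus(n, m, i, j)
--     return out
-- ===== SOURCE B (Python) =====
-- def findIslands(arr, n, m):
--     out = 0
--     for i in range(n):
--         for j in range(m):
--             if arr[i][j] == 1:
--                 out += 1
--                 stack = [(i, j)]
--                 while stack:
--                     x, y = stack.pop()
--                     if 0 <= x < n and 0 <= y < m and arr[x][y] != 0: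
--                         arr[x][y] = 0
--                         stack.extend([(x, y - 1), (x + 1, y - 1), (x + 1, y),
--                                       (x + 1, y + 1), (x, y + 1), (x - 1, y + 1),
--                                       (x - 1, y), (x - 1, y - 1)])
--     return out
-- ===== Notes on version B (the rewrite author's own statement) =====
-- stated objective: alternative
-- what changed: The recursive 8-way flood fill is replaced by an iterative flood fill with an explicit worklist stack (pop a cell, skip if out of bounds or already 0, zero it and push its 8 neighbours), keeping the same outer scan-and-count loop.
import Mathlib
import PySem

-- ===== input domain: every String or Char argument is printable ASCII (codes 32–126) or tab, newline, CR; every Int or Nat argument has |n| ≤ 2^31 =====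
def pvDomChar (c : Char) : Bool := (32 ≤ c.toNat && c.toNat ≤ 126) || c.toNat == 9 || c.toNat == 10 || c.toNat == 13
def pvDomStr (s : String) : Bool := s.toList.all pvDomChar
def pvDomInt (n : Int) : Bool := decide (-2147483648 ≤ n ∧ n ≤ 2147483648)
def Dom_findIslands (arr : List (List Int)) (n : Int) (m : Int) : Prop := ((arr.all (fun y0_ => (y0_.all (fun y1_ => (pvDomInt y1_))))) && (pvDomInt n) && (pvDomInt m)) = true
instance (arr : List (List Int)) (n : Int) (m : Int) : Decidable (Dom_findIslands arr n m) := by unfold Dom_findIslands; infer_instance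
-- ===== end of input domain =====

-- B replaces A's recursive 8-way flood fill by an iterative flood fill with an explicit
-- worklist stack (alternative decomposition; same cost). Both Pythons zero out visited
-- cells of arr in place in the same way; the theorems below are about the return value,
-- modelled by threading the grid as state.

-- ===== PORT A =====
-- shared indexing helpers: arr[i][j] read / arr[i][j] = 0 write; exact under Pre_
-- (every access both Pythons make is in range there, so getD never takes its default).
def cellAt (g : List (List Int)) (i j : Int) : Int :=
  (g.getD i.toNat []).getD j.toNat 0

def setZero (g : List (List Int)) (i j : Int) : List (List Int) :=
  g.set i.toNat ((g.getD i.toNat []).set j.toNat 0)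

-- A's recursive spreadCoronavirus; the Nat fuel is a porting artifact (the recursion
-- zeroes a cell before each nested call, so total-cells+1 fuel is never exhausted).
def spread (fuel : Nat) (g : List (List Int)) (n m i j : Int) : List (List Int) :=
  match fuel with
  | 0 => g
  | fuel + 1 =>
    if i < 0 ∨ i > n - 1 ∨ j < 0 ∨ j > m - 1 ∨ cellAt g i j = 0 then g
    else
      let g0 := setZero g i j
      let g1 := spread fuel g0 n m (i - 1) (j - 1)
      let g2 := spread fuel g1 n m (i - 1) j
      let g3 := spread fuel g2 n m (i - 1) (j + 1)
      let g4 := spread fuel g3 n m i (j + 1)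
      let g5 := spread fuel g4 n m (i + 1) (j + 1)
      let g6 := spread fuel g5 n m (i + 1) j
      let g7 := spread fuel g6 n m (i + 1) (j - 1)
      spread fuel g7 n m i (j - 1)

def findIslands (arr : List (List Int)) (n : Int) (m : Int) : Int :=
  let fuel := (arr.map List.length).sum + 1
  ((PySem.List.pyRange 0 n 1).foldl (fun (st : List (List Int) × Int) i =>
    (PySem.List.pyRange 0 m 1).foldl (fun st j =>
      if cellAt st.1 i j = 1 then (spread fuel st.1 n m i j, st.2 + 1) else st) st)
    (arr, 0)).2

-- ===== PORT B =====
-- B's while-loop over the explicit stack; head of the list = top of the Python stack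
-- (pop takes the head, extend pushes the 8 neighbours so that (x,y-1) … (x-1,y-1)
-- are popped last-pushed-first). Fuel 9*cells+2 covers every pop the loop can make.
def flood (fuel : Nat) (g : List (List Int)) (n m : Int)
    (stack : List (Int × Int)) : List (List Int) :=
  match fuel with
  | 0 => g
  | fuel + 1 =>
    match stack with
    | [] => g
    | (x, y) :: rest =>
      if 0 ≤ x ∧ x < n ∧ 0 ≤ y ∧ y < m ∧ cellAt g x y ≠ 0 then
        flood fuel (setZero g x y) n m
          ((x - 1, y - 1) :: (x - 1, y) :: (x - 1, y + 1) :: (x, y + 1) ::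
           (x + 1, y + 1) :: (x + 1, y) :: (x + 1, y - 1) :: (x, y - 1) :: rest)
      else flood fuel g n m rest

def findIslands_alt (arr : List (List Int)) (n : Int) (m : Int) : Int :=
  let fuel := 9 * (arr.map List.length).sum + 2
  ((PySem.List.pyRange 0 n 1).foldl (fun (st : List (List Int) × Int) i =>
    (PySem.List.pyRange 0 m 1).foldl (fun st j =>
      if cellAt st.1 i j = 1 then (flood fuel st.1 n m [(i, j)], st.2 + 1) else st) st)
    (arr, 0)).2

-- ===== PRECONDITION & SPEC =====
-- Pre_ excludes exactly the inputs on which Python A raises IndexError: a positive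
-- n×m scan region that sticks out of the actual list-of-lists.
def Pre_findIslands (arr : List (List Int)) (n : Int) (m : Int) : Prop :=
  n ≤ 0 ∨ m ≤ 0 ∨ (n ≤ (arr.length : Int) ∧ ∀ row ∈ arr.take n.toNat, m ≤ (row.length : Int))
instance (arr : List (List Int)) (n : Int) (m : Int) : Decidable (Pre_findIslands arr n m) := by
  unfold Pre_findIslands; infer_instance

def pvWitness_findIslands : List (List Int) × Int × Int :=
  ([[1, 1, 0], [0, 0, 1]], 2, 3)

def Spec_findIslands (arr : List (List Int)) (n : Int) (m : Int) (out : Int) : Prop := out = findIslands_alt arr n m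
instance (arr : List (List Int)) (n : Int) (m : Int) (out : Int) : Decidable (Spec_findIslands arr n m out) := by unfold Spec_findIslands; infer_instance

-- ===== CLAIM (what is proved, stated in full; the proofs are below) =====
def Claim_equal_findIslands : Prop := ∀ (arr : List (List Int)) (n : Int) (m : Int), Dom_findIslands arr n m → Pre_findIslands arr n m → Spec_findIslands arr n m (findIslands arr n m)

-- ===== LEMMAS AND PROOFS =====

-- number of nonzero cells; the grids' total size
def rowNZ (r : List Int) : Nat := r.countP (fun x => x != 0)
def countNZ (g : List (List Int)) : Nat := (g.map rowNZ).sum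
def total (g : List (List Int)) : Nat := (g.map List.length).sum

-- the 8 neighbours in A's clockwise order (= B's pop order)
def nbrs (i j : Int) : List (Int × Int) :=
  [(i-1,j-1), (i-1,j), (i-1,j+1), (i,j+1), (i+1,j+1), (i+1,j), (i+1,j-1), (i,j-1)]

-- canonical-fuel versions used only in the proofs
def SpreadC (g : List (List Int)) (n m i j : Int) : List (List Int) :=
  spread (countNZ g + 1) g n m i j
def FloodC (g : List (List Int)) (n m : Int) (st : List (Int × Int)) : List (List Int) :=
  flood (9 * countNZ g + st.length + 1) g n m st

theorem spread_succ (f : Nat) (g : List (List Int)) (n m i j : Int) :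
    spread (f + 1) g n m i j =
      if i < 0 ∨ i > n - 1 ∨ j < 0 ∨ j > m - 1 ∨ cellAt g i j = 0 then g
      else (nbrs i j).foldl (fun h c => spread f h n m c.1 c.2) (setZero g i j) := by
  rw [spread]; split <;> rfl

theorem flood_nil (f : Nat) (g : List (List Int)) (n m : Int) :
    flood f g n m [] = g := by
  cases f <;> rfl

theorem flood_cons (f : Nat) (g : List (List Int)) (n m x y : Int)
    (rest : List (Int × Int)) :
    flood (f + 1) g n m ((x, y) :: rest) =
      if 0 ≤ x ∧ x < n ∧ 0 ≤ y ∧ y < m ∧ cellAt g x y ≠ 0 then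
        flood f (setZero g x y) n m (nbrs x y ++ rest)
      else flood f g n m rest := rfl

theorem rowNZ_set (r : List Int) (j : Nat) (h : r.getD j 0 ≠ 0) :
    rowNZ (r.set j 0) < rowNZ r := by
  induction r generalizing j with
  | nil => simp at h
  | cons a t ih =>
    cases j with
    | zero =>
      simp only [List.getD_cons_zero] at h
      simp [rowNZ, h]
    | succ j =>
      simp only [List.getD_cons_succ] at h
      have := ih j h
      simp [rowNZ, List.countP_cons] at this ⊢
      omega

theorem countNZ_setZero (g : List (List Int)) (i j : Int)
    (h : cellAt g i j ≠ 0) : countNZ (setZero g i j) < countNZ g := by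
  unfold cellAt at h
  unfold setZero
  generalize i.toNat = ii at *
  induction g generalizing ii with
  | nil => simp at h
  | cons r t ih =>
    cases ii with
    | zero =>
      simp only [List.getD_cons_zero] at h ⊢
      have := rowNZ_set r j.toNat h
      simp [countNZ]
      omega
    | succ ii =>
      simp only [List.getD_cons_succ] at h
      have := ih ii h
      simp [countNZ] at this ⊢
      omega

theorem countNZ_le_total (g : List (List Int)) : countNZ g ≤ total g := by
  induction g with
  | nil => simp [countNZ, total]
  | cons r t ih =>
    have : rowNZ r ≤ r.length := List.countP_le_length
    simp [countNZ, total] at ih ⊢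
    omega

theorem total_setZero (g : List (List Int)) (i j : Int) :
    total (setZero g i j) = total g := by
  unfold setZero
  generalize i.toNat = ii
  induction g generalizing ii with
  | nil => simp
  | cons r t ih =>
    cases ii with
    | zero => simp [total]
    | succ ii => have := ih ii; simp [total] at this ⊢; omega

theorem total_spread (f : Nat) (g : List (List Int)) (n m i j : Int) :
    total (spread f g n m i j) = total g := by
  induction f generalizing g i j with
  | zero => rfl
  | succ f ih =>
    rw [spread]
    split
    · rfl
    · simp only []
      rw [ih, ih, ih, ih, ih, ih, ih, ih, total_setZero]

theorem countNZ_spread_le (f : Nat) (g : List (List Int)) (n m i j : Int) :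
    countNZ (spread f g n m i j) ≤ countNZ g := by
  induction f generalizing g i j with
  | zero => exact le_refl _
  | succ f ih =>
    rw [spread]
    split
    · exact le_refl _
    · rename_i hguard
      have hc : cellAt g i j ≠ 0 := by
        intro h0; exact hguard (Or.inr (Or.inr (Or.inr (Or.inr h0))))
      have h1 := countNZ_setZero g i j hc
      calc countNZ _ ≤ countNZ (setZero g i j) := by
            exact le_trans (ih ..) (le_trans (ih ..) (le_trans (ih ..)
              (le_trans (ih ..) (le_trans (ih ..) (le_trans (ih ..)
              (le_trans (ih ..) (ih ..)))))))
        _ ≤ countNZ g := le_of_lt h1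

theorem spread_fuel_stable : ∀ (k : Nat) (g : List (List Int)) (f₁ f₂ : Nat) (n m i j : Int),
    countNZ g < k → countNZ g < f₁ → countNZ g < f₂ →
    spread f₁ g n m i j = spread f₂ g n m i j := by
  intro k
  induction k with
  | zero => intro g f₁ f₂ n m i j hk h₁ h₂; omega
  | succ k ih =>
    intro g f₁ f₂ n m i j hk h₁ h₂
    cases f₁ with
    | zero => omega
    | succ a =>
      cases f₂ with
      | zero => omega
      | succ b =>
        rw [spread_succ, spread_succ]
        split
        · rfl
        · rename_i hguard
          have hc : cellAt g i j ≠ 0 := fun h0 =>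
            hguard (Or.inr (Or.inr (Or.inr (Or.inr h0))))
          have hdec := countNZ_setZero g i j hc
          have chain : ∀ (cs : List (Int × Int)) (h : List (List Int)), countNZ h < countNZ g →
              cs.foldl (fun h' c => spread a h' n m c.1 c.2) h
                = cs.foldl (fun h' c => spread b h' n m c.1 c.2) h := by
            intro cs
            induction cs with
            | nil => intro h _; rfl
            | cons c cs ihc =>
              intro h hh
              simp only [List.foldl]
              rw [ih h a b n m c.1 c.2 (by omega) (by omega) (by omega)]
              have := countNZ_spread_le b h n m c.1 c.2
              exact ihc _ (by omega)
          exact chain (nbrs i j) (setZero g i j) hdec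

theorem flood_fuel_stable : ∀ (f₁ : Nat) (g : List (List Int)) (f₂ : Nat) (n m : Int)
    (st : List (Int × Int)),
    9 * countNZ g + st.length < f₁ → 9 * countNZ g + st.length < f₂ →
    flood f₁ g n m st = flood f₂ g n m st := by
  intro f₁
  induction f₁ with
  | zero => intro g f₂ n m st h₁ h₂; omega
  | succ f₁ ih =>
    intro g f₂ n m st h₁ h₂
    cases f₂ with
    | zero => omega
    | succ f₂ =>
      cases st with
      | nil => rw [flood_nil, flood_nil]
      | cons p rest =>
        obtain ⟨x, y⟩ := p
        rw [flood_cons, flood_cons]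
        split
        · rename_i hg
          have hd := countNZ_setZero g x y hg.2.2.2.2
          apply ih
          · simp only [List.length_append, List.length_cons, nbrs] at *
            simp at *
            omega
          · simp only [List.length_append, List.length_cons, nbrs] at *
            simp at *
            omega
        · apply ih
          · simp at h₁ ⊢; omega
          · simp at h₂ ⊢; omega

theorem spread_chain : ∀ (cs : List (Int × Int)) (h : List (List Int)) (f : Nat) (n m : Int),
    countNZ h < f →
    cs.foldl (fun h' c => spread f h' n m c.1 c.2) h
      = cs.foldl (fun h' c => SpreadC h' n m c.1 c.2) h := by
  intro cs
  induction cs with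
  | nil => intro h f n m _; rfl
  | cons c cs ihc =>
    intro h f n m hh
    simp only [List.foldl]
    have e : spread f h n m c.1 c.2 = SpreadC h n m c.1 c.2 :=
      spread_fuel_stable (countNZ h + 1) h f (countNZ h + 1) n m c.1 c.2 (by omega) hh (by omega)
    rw [e]
    have hle : countNZ (SpreadC h n m c.1 c.2) ≤ countNZ h := countNZ_spread_le ..
    exact ihc _ f n m (by omega)

-- the key simulation lemma: one pop of the worklist equals one recursive spread
theorem key : ∀ (k : Nat) (g : List (List Int)) (n m i j : Int) (st : List (Int × Int)),
    countNZ g < k →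
    FloodC g n m ((i, j) :: st) = FloodC (SpreadC g n m i j) n m st := by
  intro k
  induction k with
  | zero => intro g n m i j st h; omega
  | succ k ih =>
    intro g n m i j st hk
    by_cases hg : 0 ≤ i ∧ i < n ∧ 0 ≤ j ∧ j < m ∧ cellAt g i j ≠ 0
    · -- guard passes: both zero (i,j); the worklist picks up the 8 neighbours in DFS order
      have hc : cellAt g i j ≠ 0 := hg.2.2.2.2
      have hdec : countNZ (setZero g i j) < countNZ g := countNZ_setZero g i j hc
      have lhs : FloodC g n m ((i, j) :: st) =
          FloodC (setZero g i j) n m (nbrs i j ++ st) := by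
        unfold FloodC
        simp only [List.length_cons]
        rw [flood_cons, if_pos hg]
        apply flood_fuel_stable
        all_goals simp [nbrs]
        all_goals omega
      have floodchain : ∀ (cs : List (Int × Int)) (h : List (List Int)) (st' : List (Int × Int)),
          countNZ h < k →
          FloodC h n m (cs ++ st') =
            FloodC (cs.foldl (fun h' c => SpreadC h' n m c.1 c.2) h) n m st' := by
        intro cs
        induction cs with
        | nil => intro h st' _; rfl
        | cons c cs ihc =>
          intro h st' hh
          obtain ⟨a, b⟩ := c
          rw [List.cons_append]
          rw [ih h n m a b (cs ++ st') hh]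
          have hle : countNZ (SpreadC h n m a b) ≤ countNZ h := countNZ_spread_le ..
          exact ihc (SpreadC h n m a b) st' (by omega)
      have rhs : SpreadC g n m i j =
          (nbrs i j).foldl (fun h' c => SpreadC h' n m c.1 c.2) (setZero g i j) := by
        unfold SpreadC
        rw [spread_succ, if_neg (by omega)]
        exact spread_chain (nbrs i j) (setZero g i j) (countNZ g) n m (by omega)
      rw [lhs, rhs]
      exact floodchain (nbrs i j) (setZero g i j) st (by omega)
    · -- guard fails: the pop is a skip and spread returns g unchanged
      have hsp : SpreadC g n m i j = g := by
        unfold SpreadC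
        rw [spread_succ, if_pos (by omega)]
      rw [hsp]
      unfold FloodC
      simp only [List.length_cons]
      rw [flood_cons, if_neg hg]
      apply flood_fuel_stable
      all_goals simp

-- per-cell: B's single-island flood from (i,j) equals A's recursive spread
theorem cell_eq (g : List (List Int)) (n m i j : Int) (T : Nat) (hT : total g = T) :
    flood (9 * T + 2) g n m [(i, j)] = spread (T + 1) g n m i j := by
  have hc : countNZ g ≤ T := hT ▸ countNZ_le_total g
  have h1 : flood (9 * T + 2) g n m [(i, j)] = FloodC g n m [(i, j)] := by
    apply flood_fuel_stable
    all_goals simp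
    all_goals omega
  have h2 := key (countNZ g + 1) g n m i j [] (by omega)
  have h3 : FloodC (SpreadC g n m i j) n m [] = SpreadC g n m i j := flood_nil ..
  have h4 : spread (T + 1) g n m i j = SpreadC g n m i j :=
    spread_fuel_stable (countNZ g + 1) g (T + 1) (countNZ g + 1) n m i j (by omega) (by omega) (by omega)
  rw [h1, h2, h3, h4]

-- the two inner loops agree and preserve the grid's total size
theorem inner_eq (n m i : Int) (T : Nat) (js : List Int) :
    ∀ (st : List (List Int) × Int), total st.1 = T →
    (js.foldl (fun st j => if cellAt st.1 i j = 1 then (spread (T+1) st.1 n m i j, st.2 + 1) else st) st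
      = js.foldl (fun st j => if cellAt st.1 i j = 1 then (flood (9*T+2) st.1 n m [(i, j)], st.2 + 1) else st) st)
    ∧ total (js.foldl (fun st j => if cellAt st.1 i j = 1 then (spread (T+1) st.1 n m i j, st.2 + 1) else st) st).1 = T := by
  induction js with
  | nil => intro st h; exact ⟨rfl, h⟩
  | cons j js ihj =>
    intro st h
    simp only [List.foldl]
    by_cases hc : cellAt st.1 i j = 1
    · rw [if_pos hc, if_pos hc]
      have he : flood (9*T+2) st.1 n m [(i, j)] = spread (T+1) st.1 n m i j :=
        cell_eq st.1 n m i j T h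
      rw [he]
      exact ihj (spread (T+1) st.1 n m i j, st.2 + 1) (by rw [total_spread]; exact h)
    · rw [if_neg hc, if_neg hc]
      exact ihj st h

theorem outer_eq (n m : Int) (T : Nat) (is : List Int) :
    ∀ (st : List (List Int) × Int), total st.1 = T →
    (is.foldl (fun st i => (PySem.List.pyRange 0 m 1).foldl (fun st j => if cellAt st.1 i j = 1 then (spread (T+1) st.1 n m i j, st.2 + 1) else st) st) st
      = is.foldl (fun st i => (PySem.List.pyRange 0 m 1).foldl (fun st j => if cellAt st.1 i j = 1 then (flood (9*T+2) st.1 n m [(i, j)], st.2 + 1) else st) st) st)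
    ∧ total (is.foldl (fun st i => (PySem.List.pyRange 0 m 1).foldl (fun st j => if cellAt st.1 i j = 1 then (spread (T+1) st.1 n m i j, st.2 + 1) else st) st) st).1 = T := by
  induction is with
  | nil => intro st h; exact ⟨rfl, h⟩
  | cons i is ihi =>
    intro st h
    simp only [List.foldl]
    obtain ⟨he, ht⟩ := inner_eq n m i T (PySem.List.pyRange 0 m 1) st h
    rw [← he]
    exact ihi _ ht

-- ===== VERDICT (by name: the statement is the Claim_ definition above) =====
theorem findIslands_spec : Claim_equal_findIslands := by
  intro arr n m _ _
  unfold Spec_findIslands findIslands findIslands_alt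
  exact congrArg Prod.snd
    (outer_eq n m ((arr.map List.length).sum) (PySem.List.pyRange 0 n 1) (arr, 0) rfl).1
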